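-- pv_equiv track=rewrite | github.com/swethajp-2004/chatbot | server.py | _find_last_details_type
-- ===== SOURCE A (Python) =====
-- def _find_last_details_type(history):
--     """
--     Returns:
--       "account" if last details request was for account
--       "order"   if last details request was for order
--       None      if not found
--     """
--     if not history:
--         return None
--
--     for m in reversed(history):
--         txt = (m.get("content") or m.get("text") or "").lower().strip()
--         if not txt:
--             continue
--
--         # only consider previous turns that were clearly "details" intent
--         if "detail" not in txt and "report" not in txt:
--             continue
--
--         # if they said account in that request -> account
--         if "account" in txt or "acct" in txt:
--             return "account"
--
--         # if they said order in that request -> order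
--         if "order" in txt:
--             return "order"
--
--     return None
-- ===== SOURCE B (Python) =====
-- _KEYS = ("content", "text")
-- _TRIGGERS = ("detail", "report")
-- _ACCOUNT_WORDS = ("account", "acct")
--
--
-- def _text_of(m):
--     for k in _KEYS:
--         v = m.get(k)
--         if v:
--             return v.lower().strip()
--     return ""
--
--
-- def _find_last_details_type(history):
--     result = None
--     for m in history:
--         txt = _text_of(m)
--         if any(t in txt for t in _TRIGGERS):
--             if any(w in txt for w in _ACCOUNT_WORDS):
--                 result = "account"
--             elif "order" in txt:
--                 result = "order"
--     return result
-- ===== Notes on version B (the rewrite author's own statement) =====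
-- stated objective: alternative
-- what changed: Replaces the reversed early-return scan with a single forward pass keeping an accumulator that the last qualifying details-turn overwrites, with the text extraction rewritten as a loop over candidate keys and the keyword tests as any() over keyword tuples.
import Mathlib
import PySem

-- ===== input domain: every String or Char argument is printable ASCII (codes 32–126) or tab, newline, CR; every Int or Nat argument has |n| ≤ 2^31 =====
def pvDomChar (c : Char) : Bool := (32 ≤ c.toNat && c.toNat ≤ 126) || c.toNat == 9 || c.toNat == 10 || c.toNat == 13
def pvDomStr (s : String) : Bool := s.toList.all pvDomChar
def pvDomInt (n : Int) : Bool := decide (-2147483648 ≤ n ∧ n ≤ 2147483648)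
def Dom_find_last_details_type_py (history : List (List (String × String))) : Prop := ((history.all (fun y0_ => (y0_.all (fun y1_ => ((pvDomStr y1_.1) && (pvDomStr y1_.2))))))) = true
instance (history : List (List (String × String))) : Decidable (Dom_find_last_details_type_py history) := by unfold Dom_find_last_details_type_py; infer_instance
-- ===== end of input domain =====

-- B replaces A's reversed early-return scan by a forward fold with an overwritten accumulator (objective: alternative decomposition, same cost).


-- ===== PORT A =====
-- m.get(k) on an association list: first match (dict convention)
def pvGetStr (m : List (String × String)) (k : String) : Option String :=
  (m.find? (fun p => p.1 == k)).map (·.2)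

-- `x or y` on a str-valued Option: '' and None are falsy
def pvTruthy (o : Option String) : Option String :=
  match o with
  | some s => if s = "" then none else some s
  | none => none

-- txt = (m.get("content") or m.get("text") or "").lower().strip()
def pvMsgText (m : List (String × String)) : String :=
  PySem.Str.strip (PySem.Str.lower
    (((pvTruthy (pvGetStr m "content")).orElse (fun _ => pvTruthy (pvGetStr m "text"))).getD ""))

-- the `for m in reversed(history)` loop, on the already-reversed list
def pvLoopA : List (List (String × String)) → Option String
  | [] => none
  | m :: rest =>
    let txt := pvMsgText m
    if txt = "" then pvLoopA rest
    else if !PySem.Str.isIn "detail" txt && !PySem.Str.isIn "report" txt then pvLoopA rest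
    else if PySem.Str.isIn "account" txt || PySem.Str.isIn "acct" txt then some "account"
    else if PySem.Str.isIn "order" txt then some "order"
    else pvLoopA rest

def find_last_details_type_py (history : List (List (String × String))) : Option String :=
  if history = [] then none else pvLoopA history.reverse

-- ===== PORT B =====
-- _text_of: loop over candidate keys, first truthy value wins, lowered and stripped
def pvTextOf (keys : List String) (m : List (String × String)) : String :=
  match keys with
  | [] => ""
  | k :: ks =>
    match (m.find? (fun p => p.1 == k)).map (·.2) with
    | some v => if v ≠ "" then PySem.Str.strip (PySem.Str.lower v) else pvTextOf ks m
    | none => pvTextOf ks m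

-- one iteration of B's forward loop: overwrite the accumulator on a qualifying turn
def pvStepB (acc : Option String) (m : List (String × String)) : Option String :=
  let txt := pvTextOf ["content", "text"] m
  if ["detail", "report"].any (fun t => PySem.Str.isIn t txt) then
    if ["account", "acct"].any (fun w => PySem.Str.isIn w txt) then some "account"
    else if PySem.Str.isIn "order" txt then some "order"
    else acc
  else acc

def find_last_details_type_py_alt (history : List (List (String × String))) : Option String :=
  history.foldl pvStepB none

-- ===== PRECONDITION & SPEC =====
def Spec_find_last_details_type_py (history : List (List (String × String))) (out : Option String) : Prop := out = find_last_details_type_py_alt history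
instance (history : List (List (String × String))) (out : Option String) : Decidable (Spec_find_last_details_type_py history out) := by unfold Spec_find_last_details_type_py; infer_instance

-- ===== CLAIM (what is proved, stated in full; the proofs are below) =====
def Claim_equal_find_last_details_type_py : Prop := ∀ (history : List (List (String × String))), Dom_find_last_details_type_py history → Spec_find_last_details_type_py history (find_last_details_type_py history)

-- ===== LEMMAS AND PROOFS =====
-- proof-side classifier: the value a single message contributes, or none
def pvClassify (m : List (String × String)) : Option String :=
  let txt := pvMsgText m
  if PySem.Str.isIn "detail" txt || PySem.Str.isIn "report" txt then
    if PySem.Str.isIn "account" txt || PySem.Str.isIn "acct" txt then some "account"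
    else if PySem.Str.isIn "order" txt then some "order"
    else none
  else none

theorem isIn_nil_false (sub : String) (h : sub ≠ "") : PySem.Str.isIn sub "" = false := by
  rw [Bool.eq_false_iff]
  intro hc
  rw [PySem.Str.isIn_iff_infix] at hc
  have := List.IsInfix.length_le hc
  simp at this
  exact h (by cases sub; simp_all)

theorem pvTextOf_eq (m : List (String × String)) :
    pvTextOf ["content", "text"] m = pvMsgText m := by
  rw [pvMsgText, pvGetStr, pvGetStr]
  rw [pvTextOf, pvTextOf, pvTextOf]
  cases hc : (m.find? (fun p => p.1 == "content")).map (·.2) with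
  | some v =>
    by_cases hv : v = ""
    · subst hv
      simp only [ne_eq, not_true_eq_false, if_false, pvTruthy, Option.orElse]
      cases ht : (m.find? (fun p => p.1 == "text")).map (·.2) with
      | some w =>
        by_cases hw : w = "" <;> simp [hw] <;> try rfl
      | none => simp; rfl
    · simp [pvTruthy, hv, Option.orElse]
  | none =>
    simp only [pvTruthy, Option.orElse]
    cases ht : (m.find? (fun p => p.1 == "text")).map (·.2) with
    | some w =>
      by_cases hw : w = "" <;> simp [hw] <;> try rfl
    | none => simp; rfl

theorem pvStepB_eq (acc : Option String) (m : List (String × String)) :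
    pvStepB acc m = match pvClassify m with
      | some v => some v
      | none => acc := by
  rw [pvStepB, pvClassify, pvTextOf_eq]
  set txt := pvMsgText m
  simp only [List.any_cons, List.any_nil, Bool.or_false]
  split_ifs <;> rfl

theorem pvLoopA_cons (m : List (String × String)) (rest : List (List (String × String))) :
    pvLoopA (m :: rest) = match pvClassify m with
      | some v => some v
      | none => pvLoopA rest := by
  rw [pvLoopA, pvClassify]
  set txt := pvMsgText m with htxt
  by_cases h0 : txt = ""
  · rw [if_pos h0, h0,
      isIn_nil_false "detail" (by decide), isIn_nil_false "report" (by decide)]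
    rfl
  · rw [if_neg h0]
    by_cases hd : (PySem.Str.isIn "detail" txt || PySem.Str.isIn "report" txt) = true
    · have hd' : (!PySem.Str.isIn "detail" txt && !PySem.Str.isIn "report" txt) = false := by
        revert hd
        cases PySem.Str.isIn "detail" txt <;> cases PySem.Str.isIn "report" txt <;> simp
      rw [hd', if_pos hd]
      simp only [Bool.false_eq_true, if_false]
      split_ifs <;> rfl
    · have hd0 : (PySem.Str.isIn "detail" txt || PySem.Str.isIn "report" txt) = false := by
        revert hd
        cases PySem.Str.isIn "detail" txt <;> cases PySem.Str.isIn "report" txt <;> simp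
      have hd' : (!PySem.Str.isIn "detail" txt && !PySem.Str.isIn "report" txt) = true := by
        revert hd0
        cases PySem.Str.isIn "detail" txt <;> cases PySem.Str.isIn "report" txt <;> simp
      rw [hd', hd0, if_pos rfl]
      rfl

-- the forward fold equals A's reversed scan, defaulting to the accumulator
theorem foldl_eq_loopA (ys : List (List (String × String))) :
    ∀ acc, ys.foldl pvStepB acc = match pvLoopA ys.reverse with
      | some v => some v
      | none => acc := by
  induction ys using List.reverseRecOn with
  | nil => intro acc; rfl
  | append_singleton ys m ih =>
    intro acc
    rw [List.foldl_append, List.foldl_cons, List.foldl_nil, ih, List.reverse_append]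
    simp only [List.reverse_singleton, List.singleton_append]
    rw [pvLoopA_cons, pvStepB_eq]
    cases pvClassify m <;> rfl

theorem find_last_details_type_py_eq (history : List (List (String × String))) :
    find_last_details_type_py history = find_last_details_type_py_alt history := by
  unfold find_last_details_type_py find_last_details_type_py_alt
  by_cases h : history = []
  · rw [if_pos h, h]; rfl
  · rw [if_neg h, foldl_eq_loopA]
    cases pvLoopA history.reverse <;> rfl

-- ===== VERDICT (by name: the statement is the Claim_ definition above) =====
theorem find_last_details_type_py_spec : Claim_equal_find_last_details_type_py := by
  intro history _
  exact find_last_details_type_py_eq history
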